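-- pv_equiv track=rewrite | github.com/samclee/undrstudy2 | undrstudy2.py | fill_quoted_spaces
-- ===== SOURCE A (Python) =====
-- def fill_quoted_spaces(str):
--   str_ary = list(str)
--   should_fill = False
--   for i in range(len(str_ary)):
--     char = str_ary[i]
--     if char == ' ' and should_fill:
--       str_ary[i] = "@"
--     elif char == '"':
--       should_fill = not should_fill
--   return ''.join(str_ary)
-- ===== SOURCE B (Python) =====
-- def fill_quoted_spaces(str):
--   parts = str.split('"')
--   out = []
--   inside = False
--   for p in parts:
--     out.append(p.replace(' ', '@') if inside else p)
--     inside = not inside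
--   return '"'.join(out)
-- ===== Notes on version B (the rewrite author's own statement) =====
-- stated objective: idiomatic
-- what changed: Replaces the index loop that mutates a char array under a quote-parity flag with split on '"', a per-segment .replace(' ','@') on the inside-quote segments, and a '"'.join.
import Mathlib
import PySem

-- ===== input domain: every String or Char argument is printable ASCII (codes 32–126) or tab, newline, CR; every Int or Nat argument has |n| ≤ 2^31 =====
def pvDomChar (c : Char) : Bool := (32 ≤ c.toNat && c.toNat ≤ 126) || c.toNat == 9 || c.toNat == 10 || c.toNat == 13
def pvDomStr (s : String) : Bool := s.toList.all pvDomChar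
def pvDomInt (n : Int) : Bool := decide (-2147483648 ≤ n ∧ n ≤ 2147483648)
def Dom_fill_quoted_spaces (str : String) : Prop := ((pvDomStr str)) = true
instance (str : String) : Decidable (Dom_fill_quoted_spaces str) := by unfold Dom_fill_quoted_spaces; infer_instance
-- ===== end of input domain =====

-- B replaces A's index loop over a mutable char array with split on '"' / replace / join (more idiomatic).


-- ===== PORT A =====
-- A: walk the char array by index; inside quotes (flag toggled by '"') overwrite ' ' with '@'.
def fillStepA (st : List Char × Bool) (i : Int) : List Char × Bool :=
  let char := PySem.List.pyGetD st.1 i ' '          -- str_ary[i]; i is always in range here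
  if char = ' ' ∧ st.2 = true then (st.1.set i.toNat '@', st.2)   -- str_ary[i] = "@" (i ≥ 0)
  else if char = '"' then (st.1, !st.2)
  else st

def fill_quoted_spaces (str : String) : String :=
  let strAry := str.toList
  let st := (PySem.List.pyRange 0 strAry.length 1).foldl fillStepA (strAry, false)
  String.ofList st.1

-- ===== PORT B =====
-- B: split on '"', replace spaces in the odd (inside-quote) segments, rejoin with '"'.
def fill_quoted_spaces_alt (str : String) : String :=
  let parts := PySem.Chars.splitOn str.toList ['"']
  let st := parts.foldl
    (fun (st : List (List Char) × Bool) p =>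
      (st.1 ++ [if st.2 then PySem.Chars.replace p [' '] ['@'] else p], !st.2))
    ([], false)
  String.ofList (PySem.Chars.join ['"'] st.1)

-- ===== PRECONDITION & SPEC =====
def Spec_fill_quoted_spaces (str : String) (out : String) : Prop := out = fill_quoted_spaces_alt str
instance (str : String) (out : String) : Decidable (Spec_fill_quoted_spaces str out) := by unfold Spec_fill_quoted_spaces; infer_instance

-- ===== CLAIM (what is proved, stated in full; the proofs are below) =====
def Claim_equal_fill_quoted_spaces : Prop := ∀ (str : String), Dom_fill_quoted_spaces str → Spec_fill_quoted_spaces str (fill_quoted_spaces str)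

-- ===== LEMMAS AND PROOFS =====

-- the common functional core: process chars with the quote flag
def fillRun : List Char → Bool → List Char × Bool
  | [], b => ([], b)
  | c :: cs, b =>
    let c' := if c = ' ' ∧ b = true then '@' else c
    let b' := if c = '"' then !b else b
    ((fillRun cs b').1.cons c', (fillRun cs b').2)

-- structural version of str.split('"')
def qsplit : List Char → List (List Char)
  | [] => [[]]
  | c :: cs => if c = '"' then [] :: qsplit cs else
      match qsplit cs with
      | [] => [[c]]
      | s :: ss => (c :: s) :: ss

def consHeadL (p : List Char) : List (List Char) → List (List Char)
  | [] => [p]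
  | s :: ss => (p ++ s) :: ss

-- segment-wise space replacement with alternating flag
def fillRep (cs : List Char) : List Char := cs.map (fun c => if c = ' ' then '@' else c)

def altRep : Bool → List (List Char) → List (List Char)
  | _, [] => []
  | b, s :: ss => (if b then fillRep s else s) :: altRep (!b) ss

lemma qsplit_ne_nil (cs : List Char) : qsplit cs ≠ [] := by
  cases cs with
  | nil => simp [qsplit]
  | cons c cs =>
    simp only [qsplit]
    split
    · simp
    · cases h : qsplit cs <;> simp

lemma replace_go_spec (fuel : Nat) (l acc : List Char) (h : l.length ≤ fuel) :
    PySem.Chars.replace.go [' '] ['@'] fuel l acc = acc.reverse ++ fillRep l := by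
  induction fuel generalizing l acc with
  | zero =>
    have hl : l = [] := List.eq_nil_of_length_eq_zero (Nat.le_zero.mp h)
    subst hl
    simp [PySem.Chars.replace.go, fillRep]
  | succ fuel ih =>
    cases l with
    | nil => simp [PySem.Chars.replace.go, fillRep]
    | cons c t =>
      rw [PySem.Chars.replace.go.eq_def]
      dsimp only
      by_cases hc : c = ' '
      · subst hc
        rw [if_pos (by simp [List.isPrefixOf])]
        rw [ih _ _ (by simpa using Nat.le_of_succ_le_succ h)]
        simp [fillRep]
      · rw [if_neg (by simp [List.isPrefixOf, Ne.symm hc])]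
        rw [ih _ _ (by simpa using Nat.le_of_succ_le_succ h)]
        simp [fillRep, hc]

lemma replace_spec (l : List Char) :
    PySem.Chars.replace l [' '] ['@'] = fillRep l := by
  rw [PySem.Chars.replace]
  rw [if_neg (by simp)]
  exact replace_go_spec l.length l [] (le_refl _)

lemma splitOn_go_spec (fuel : Nat) (l cur : List Char) (acc : List (List Char))
    (h : l.length ≤ fuel) :
    PySem.Chars.splitOn.go ['"'] fuel l cur acc
      = acc.reverse ++ consHeadL cur.reverse (qsplit l) := by
  induction fuel generalizing l cur acc with
  | zero =>
    have hl : l = [] := List.eq_nil_of_length_eq_zero (Nat.le_zero.mp h)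
    subst hl
    rw [PySem.Chars.splitOn.go.eq_def]
    simp [qsplit, consHeadL]
  | succ fuel ih =>
    cases l with
    | nil =>
      rw [PySem.Chars.splitOn.go.eq_def]
      simp [qsplit, consHeadL]
    | cons c rest =>
      rw [PySem.Chars.splitOn.go.eq_def]
      dsimp only
      by_cases hc : c = '"'
      · subst hc
        rw [if_pos (by simp [List.isPrefixOf])]
        rw [ih _ _ _ (by simpa using Nat.le_of_succ_le_succ h)]
        have hne := qsplit_ne_nil rest
        cases hq : qsplit rest with
        | nil => exact absurd hq hne
        | cons s ss => simp [qsplit, consHeadL, hq]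
      · rw [if_neg (by simp [List.isPrefixOf, Ne.symm hc])]
        rw [ih _ _ _ (by simpa using Nat.le_of_succ_le_succ h)]
        have hne := qsplit_ne_nil rest
        cases hq : qsplit rest with
        | nil => exact absurd hq hne
        | cons s ss => simp [qsplit, consHeadL, hq, hc]

lemma splitOn_spec (l : List Char) :
    PySem.Chars.splitOn l ['"'] = qsplit l := by
  rw [PySem.Chars.splitOn]
  rw [splitOn_go_spec _ _ _ _ (by omega)]
  have hne := qsplit_ne_nil l
  cases hq : qsplit l with
  | nil => exact absurd hq hne
  | cons s ss => simp [consHeadL]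

-- B's fold over the parts builds altRep
lemma b_fold_spec (ps : List (List Char)) (out : List (List Char)) (b : Bool) :
    (ps.foldl
      (fun (st : List (List Char) × Bool) p =>
        (st.1 ++ [if st.2 then PySem.Chars.replace p [' '] ['@'] else p], !st.2))
      (out, b)).1 = out ++ altRep b ps := by
  induction ps generalizing out b with
  | nil => simp [altRep]
  | cons p ps ih =>
    simp only [List.foldl_cons, altRep]
    rw [ih]
    cases b <;> simp [replace_spec]

-- the core agreement: the flag scan equals segment-wise replacement of the split
lemma run_eq_join (cs : List Char) (b : Bool) :
    (fillRun cs b).1 = PySem.Chars.join ['"'] (altRep b (qsplit cs)) := by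
  induction cs generalizing b with
  | nil => cases b <;> simp [fillRun, qsplit, altRep, fillRep, PySem.Chars.join_singleton]
  | cons c cs ih =>
    obtain ⟨s, ss, hq⟩ : ∃ s ss, qsplit cs = s :: ss := by
      cases h : qsplit cs with
      | nil => exact absurd h (qsplit_ne_nil cs)
      | cons s ss => exact ⟨s, ss, rfl⟩
    by_cases hc : c = '"'
    · subst hc
      have h1 : qsplit ('"' :: cs) = [] :: s :: ss := by simp [qsplit, hq]
      have h2 : (fillRun ('"' :: cs) b).1 = '"' :: (fillRun cs (!b)).1 := by
        simp [fillRun]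
      rw [h2, h1, ih (!b), hq]
      cases b <;> simp [altRep, PySem.Chars.join_cons_cons, fillRep]
    · have h1 : qsplit (c :: cs) = (c :: s) :: ss := by simp [qsplit, hc, hq]
      have h2 : (fillRun (c :: cs) b).1
          = (if c = ' ' ∧ b = true then '@' else c) :: (fillRun cs b).1 := by
        simp [fillRun, hc]
      rw [h2, h1, ih b, hq]
      cases ss with
      | nil =>
        cases b <;> by_cases hsp : c = ' ' <;>
          simp [altRep, PySem.Chars.join_singleton, fillRep, hsp]
      | cons t ts =>
        cases b <;> by_cases hsp : c = ' ' <;>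
          simp [altRep, PySem.Chars.join_cons_cons, fillRep, hsp]

-- A's index loop computes fillRun
lemma a_loop_spec (cs done : List Char) (b : Bool) :
    (PySem.List.pyRange (done.length : Int) ((done.length : Int) + cs.length) 1).foldl
      fillStepA (done ++ cs, b)
    = (done ++ (fillRun cs b).1, (fillRun cs b).2) := by
  induction cs generalizing done b with
  | nil => simp [fillRun, PySem.List.pyRange]
  | cons c cs ih =>
    have hlt : (done.length : Int) < (done.length : Int) + (c :: cs).length := by
      simp
    rw [PySem.List.pyRange_one_cons hlt]
    simp only [List.foldl_cons]
    have hget : PySem.List.pyGetD (done ++ c :: cs) (done.length : Int) ' ' = c := by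
      rw [PySem.List.pyGetD_natCast]
      simp [List.getD]
    have hset : (done ++ c :: cs).set done.length '@' = done ++ '@' :: cs := by
      rw [List.set_append]
      simp
    have hstep : ∀ (d' : Char) (b' : Bool),
        (PySem.List.pyRange ((done.length : Int) + 1) ((done.length : Int) + (c :: cs).length) 1).foldl
          fillStepA (done ++ d' :: cs, b')
        = ((done ++ [d']) ++ (fillRun cs b').1, (fillRun cs b').2) := by
      intro d' b'
      have := ih (done ++ [d']) b'
      have harr : done ++ d' :: cs = (done ++ [d']) ++ cs := by simp
      have hr1 : ((done ++ [d']).length : Int) = (done.length : Int) + 1 := by simp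
      have hr2 : ((done ++ [d']).length : Int) + cs.length
          = (done.length : Int) + (c :: cs).length := by simp; omega
      rw [harr, ← hr1, ← hr2]
      exact this
    by_cases hsp : c = ' ' ∧ b = true
    · obtain ⟨hc, hb⟩ := hsp
      subst hc hb
      have : fillStepA (done ++ ' ' :: cs, true) (done.length : Int)
          = (done ++ '@' :: cs, true) := by
        simp [fillStepA, hget, hset]
      rw [this, hstep]
      simp [fillRun]
    · by_cases hq : c = '"'
      · subst hq
        have : fillStepA (done ++ '"' :: cs, b) (done.length : Int)
            = (done ++ '"' :: cs, !b) := by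
          simp [fillStepA, hget]
        rw [this, hstep]
        simp [fillRun]
      · have : fillStepA (done ++ c :: cs, b) (done.length : Int) = (done ++ c :: cs, b) := by
          simp [fillStepA, hget, hsp, hq]
        rw [this, hstep]
        simp [fillRun, hsp, hq]

-- ===== VERDICT (by name: the statement is the Claim_ definition above) =====
theorem fill_quoted_spaces_spec : Claim_equal_fill_quoted_spaces := by
  intro s _
  unfold Spec_fill_quoted_spaces fill_quoted_spaces fill_quoted_spaces_alt
  simp only []
  have ha := a_loop_spec s.toList [] false
  simp only [List.nil_append, List.length_nil, Nat.cast_zero, zero_add] at ha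
  rw [ha]
  rw [b_fold_spec, splitOn_spec]
  simp [run_eq_join]
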